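-- pv_equiv track=rewrite | github.com/AmerJamakovic/LearnPy | 2DMatrix/helpers.py | is_even_with_odd_number_of_elements
-- ===== SOURCE A (Python) =====
-- def is_even_with_odd_number_of_elements(number:int) -> bool:
--     number_of_elements = 0
--     number_copy = number
--     while number>0:
--         number_of_elements += 1
--         number = float.__floor__(number / 10)
--     if number_of_elements % 2 != 0 and number_copy % 2 ==0:
--         return True
--     else:
--         return False
-- ===== SOURCE B (Python) =====
-- def is_even_with_odd_number_of_elements(number: int) -> bool:
--     if number <= 0:
--         return False
--     return len(str(number)) % 2 == 1 and number % 2 == 0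
-- ===== Notes on version B (the rewrite author's own statement) =====
-- stated objective: idiomatic
-- what changed: B replaces A's while-loop of repeated float floor-divisions that counts digits with the digit count taken as len(str(number)) behind a single non-positive guard, turning the iteration into one library call plus two parity tests.
import Mathlib
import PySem

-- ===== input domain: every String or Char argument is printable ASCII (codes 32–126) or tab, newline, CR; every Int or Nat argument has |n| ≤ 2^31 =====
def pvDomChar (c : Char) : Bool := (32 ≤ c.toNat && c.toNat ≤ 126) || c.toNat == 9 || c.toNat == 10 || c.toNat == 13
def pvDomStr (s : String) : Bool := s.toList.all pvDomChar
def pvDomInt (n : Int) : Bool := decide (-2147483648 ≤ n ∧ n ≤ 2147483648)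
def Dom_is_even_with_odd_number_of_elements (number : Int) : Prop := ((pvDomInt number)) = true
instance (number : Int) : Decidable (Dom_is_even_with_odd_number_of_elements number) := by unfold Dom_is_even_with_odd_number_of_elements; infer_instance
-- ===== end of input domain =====

-- B replaces A's digit-counting while-loop (repeated float floor-division by 10) with
-- len(str(number)) behind a single non-positive guard; objective: idiomatic.

-- ===== PORT A =====
-- the while loop: number_of_elements += 1; number = float.__floor__(number / 10).
-- On |number| ≤ 2^31 the float division is exact enough that float.__floor__(number / 10)
-- equals floor division number // 10 (PySem.Int.floordiv), which is how it is ported.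
def pvCountLoopA (number : Int) : Nat :=
  if h : 0 < number then pvCountLoopA (PySem.Int.floordiv number 10) + 1 else 0
termination_by number.toNat
decreasing_by
  rw [PySem.Int.floordiv_eq_ediv_of_pos (by norm_num : (0:Int) < 10)]
  omega

def is_even_with_odd_number_of_elements (number : Int) : Bool :=
  let number_of_elements := pvCountLoopA number
  if number_of_elements % 2 ≠ 0 ∧ PySem.Int.mod number 2 = 0 then true else false

-- ===== PORT B =====
def is_even_with_odd_number_of_elements_alt (number : Int) : Bool :=
  if number ≤ 0 then false
  else (PySem.Str.len (PySem.Int.toStr number) % 2 == 1) && (PySem.Int.mod number 2 == 0)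

-- ===== PRECONDITION & SPEC =====
def Spec_is_even_with_odd_number_of_elements (number : Int) (out : Bool) : Prop := out = is_even_with_odd_number_of_elements_alt number
instance (number : Int) (out : Bool) : Decidable (Spec_is_even_with_odd_number_of_elements number out) := by unfold Spec_is_even_with_odd_number_of_elements; infer_instance

-- ===== CLAIM (what is proved, stated in full; the proofs are below) =====
def Claim_equal_is_even_with_odd_number_of_elements : Prop := ∀ (number : Int), Dom_is_even_with_odd_number_of_elements number → Spec_is_even_with_odd_number_of_elements number (is_even_with_odd_number_of_elements number)

-- ===== LEMMAS AND PROOFS =====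

-- decimal digit count of a natural number (0 has 0 digits), the mathematical yardstick
def pvDC (n : Nat) : Nat :=
  if n = 0 then 0 else pvDC (n / 10) + 1
termination_by n
decreasing_by omega

theorem pvCountLoopA_eq (n : Int) : pvCountLoopA n = pvDC n.toNat := by
  by_cases h : 0 < n
  · rw [pvCountLoopA, dif_pos h,
      PySem.Int.floordiv_eq_ediv_of_pos (by norm_num : (0:Int) < 10),
      pvCountLoopA_eq (n / 10)]
    have h1 : (n / 10).toNat = n.toNat / 10 := by omega
    have h2 : pvDC n.toNat = pvDC (n.toNat / 10) + 1 := by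
      rw [pvDC, if_neg (by omega : ¬ n.toNat = 0)]
    rw [h1, h2]
  · rw [pvCountLoopA, dif_neg h, pvDC, if_pos (by omega : n.toNat = 0)]
termination_by n.toNat
decreasing_by omega

theorem toDigitsCore_len (f : Nat) : ∀ (n : Nat) (acc : List Char), n < 10 ^ (f + 1) →
    (Nat.toDigitsCore 10 (f + 1) n acc).length = (if n = 0 then 1 else pvDC n) + acc.length := by
  induction f with
  | zero =>
    intro n acc hn
    have h10 : n / 10 = 0 := Nat.div_eq_of_lt (by simpa using hn)
    have h' : (if n = 0 then 1 else pvDC n) = 1 := by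
      by_cases h0 : n = 0
      · rw [if_pos h0]
      · rw [if_neg h0, pvDC, if_neg h0, h10, pvDC, if_pos rfl]
    rw [h', Nat.toDigitsCore, if_pos h10, List.length_cons]
    omega
  | succ f ih =>
    intro n acc hn
    by_cases h10 : n / 10 = 0
    · have h' : (if n = 0 then 1 else pvDC n) = 1 := by
        by_cases h0 : n = 0
        · rw [if_pos h0]
        · rw [if_neg h0, pvDC, if_neg h0, h10, pvDC, if_pos rfl]
      rw [h', Nat.toDigitsCore, if_pos h10, List.length_cons]
      omega
    · have h0 : n ≠ 0 := by omega
      have hn' : n / 10 < 10 ^ (f + 1) := by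
        apply Nat.div_lt_of_lt_mul
        calc n < 10 ^ (f + 1 + 1) := hn
        _ = 10 * 10 ^ (f + 1) := by ring
      have hpv : pvDC n = pvDC (n / 10) + 1 := by rw [pvDC, if_neg h0]
      rw [Nat.toDigitsCore, if_neg h10, ih (n / 10) _ hn', if_neg h10, if_neg h0, hpv,
        List.length_cons]
      omega

theorem toDigits_len (n : Nat) :
    (Nat.toDigits 10 n).length = if n = 0 then 1 else pvDC n := by
  have hb : n < 10 ^ (n + 1) := by
    calc n < 10 ^ n := Nat.lt_pow_self (by norm_num)
    _ ≤ 10 ^ (n + 1) := Nat.pow_le_pow_right (by norm_num) (by omega)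
  have := toDigitsCore_len n n [] hb
  simpa [Nat.toDigits] using this

theorem toStr_len_pos (n : Int) (h : 0 < n) :
    (PySem.Int.toStr n).toList.length = pvDC n.toNat := by
  rw [PySem.Int.toStr, PySem.Int.toChars, if_neg (by omega), String.toList_ofList,
    toDigits_len, if_neg (by omega)]

-- ===== VERDICT (by name: the statement is the Claim_ definition above) =====
theorem is_even_with_odd_number_of_elements_spec : Claim_equal_is_even_with_odd_number_of_elements := by
  intro number _
  unfold Spec_is_even_with_odd_number_of_elements
  unfold is_even_with_odd_number_of_elements is_even_with_odd_number_of_elements_alt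
  by_cases h : number ≤ 0
  · rw [if_pos h, pvCountLoopA_eq]
    have ht : number.toNat = 0 := by omega
    rw [ht, pvDC, if_pos rfl]
    simp
  · rw [if_neg h, pvCountLoopA_eq, PySem.Str.len_eq, toStr_len_pos number (by omega)]
    rw [PySem.Int.mod_eq_emod_of_pos (by norm_num : (0:Int) < 2)]
    rcases Nat.even_or_odd (pvDC number.toNat) with he | ho
    · obtain ⟨k, hk⟩ := he
      rw [if_neg (by rintro ⟨h1, -⟩; omega)]
      have h1 : ((pvDC number.toNat : Int) % 2 == 1) = false := by
        simp only [beq_eq_false_iff_ne, ne_eq]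
        omega
      simp [h1]
    · obtain ⟨k, hk⟩ := ho
      have h1 : ((pvDC number.toNat : Int) % 2 == 1) = true := by
        simp only [beq_iff_eq]
        omega
      by_cases hm : number % 2 = 0
      · rw [if_pos ⟨by omega, hm⟩]
        simp [h1, hm]
      · rw [if_neg (by rintro ⟨-, hc⟩; exact hm hc)]
        simp [h1]
        omega
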